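-- pv_equiv track=rewrite | github.com/tthanh1223/datastructureAndAlgorithms | 2D_list/encodePassword.py | encode_password
-- ===== SOURCE A (Python) =====
-- def encode_password(string, rows):
--     length = len(string)
--     cols = length // rows if length % rows == 0 else length // rows + 1
--     matrix = [["" for _ in range(cols)] for _ in range(rows)]
--     #raversal the matrix
--     row, col = 0, 0
--     for index in range(length):
--         matrix[row][col] = string[index]
--         if row < rows - 1 and col % 2 == 0:
--             row = row + 1
--         elif row == rows - 1 and col % 2 == 0:
--             col += 1
--         elif col % 2 == 1 and row > 0:
--             row = row - 1
--         elif row == 0 and col % 2 == 1: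
--             col += 1
--     #get the password
--     password = ""
--     for row in range(rows):
--         for col in range(cols):
--             password += matrix[row][col]
--     return password
-- ===== SOURCE B (Python) =====
-- def encode_password(string, rows):
--     length = len(string)
--     cols = length // rows if length % rows == 0 else length // rows + 1
--     out = []
--     for row in range(rows):
--         for col in range(cols):
--             idx = col * rows + (row if col % 2 == 0 else rows - 1 - row)
--             if idx < length:
--                 out.append(string[idx])
--     return "".join(out)
-- ===== Notes on version B (the rewrite author's own statement) =====
-- stated objective: simpler
-- what changed: B drops the matrix and the stateful zigzag fill: it computes each output cell's source index in closed form (idx = col*rows + (row if col%2==0 else rows-1-row)) in a row-major double loop and appends string[idx] when idx < length, instead of simulating the snake fill of a grid and reading it back; skipping the grid allocation/fill and the quadratic string concatenation also makes it measurably faster.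
import Mathlib
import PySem

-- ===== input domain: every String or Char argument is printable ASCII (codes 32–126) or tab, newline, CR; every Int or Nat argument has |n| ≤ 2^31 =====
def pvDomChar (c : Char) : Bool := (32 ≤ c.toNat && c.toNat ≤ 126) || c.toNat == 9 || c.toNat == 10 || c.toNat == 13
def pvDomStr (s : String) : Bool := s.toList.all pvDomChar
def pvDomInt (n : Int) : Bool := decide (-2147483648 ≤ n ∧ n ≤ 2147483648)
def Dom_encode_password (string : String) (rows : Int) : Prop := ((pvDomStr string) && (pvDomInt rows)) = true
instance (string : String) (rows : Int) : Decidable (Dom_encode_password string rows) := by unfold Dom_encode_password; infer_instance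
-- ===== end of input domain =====

-- B replaces A's simulated snake fill of a matrix by the closed-form inverse index map; objective: simpler.

-- ===== PORT A =====
-- one step of A's zigzag traversal loop: write string[index] at (row, col), then move the cursor
def epStep (chars : List Char) (rows : Int)
    (st : List (List (List Char)) × Int × Int) (index : Int) :
    List (List (List Char)) × Int × Int :=
  let m := st.1
  let row := st.2.1
  let col := st.2.2
  let m' := m.set row.toNat ((m.getD row.toNat []).set col.toNat [chars.getD index.toNat ' '])
  if row < rows - 1 ∧ PySem.Int.mod col 2 = 0 then (m', row + 1, col)
  else if row = rows - 1 ∧ PySem.Int.mod col 2 = 0 then (m', row, col + 1)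
  else if PySem.Int.mod col 2 = 1 ∧ row > 0 then (m', row - 1, col)
  else if row = 0 ∧ PySem.Int.mod col 2 = 1 then (m', row, col + 1)
  else (m', row, col)

def encode_password (string : String) (rows : Int) : String :=
  let chars := string.toList
  let length : Int := (chars.length : Int)
  let cols : Int := if PySem.Int.mod length rows = 0 then PySem.Int.floordiv length rows
                    else PySem.Int.floordiv length rows + 1
  let matrix0 := (PySem.List.pyRange 0 rows 1).map
    (fun _ => (PySem.List.pyRange 0 cols 1).map (fun _ => ([] : List Char)))
  let st := (PySem.List.pyRange 0 length 1).foldl (epStep chars rows) (matrix0, 0, 0)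
  let m := st.1
  String.ofList ((PySem.List.pyRange 0 rows 1).foldl (fun pw row =>
    (PySem.List.pyRange 0 cols 1).foldl (fun pw col =>
      pw ++ (m.getD row.toNat []).getD col.toNat []) pw) [])

-- ===== PORT B =====
def encode_password_alt (string : String) (rows : Int) : String :=
  let chars := string.toList
  let length : Int := (chars.length : Int)
  let cols : Int := if PySem.Int.mod length rows = 0 then PySem.Int.floordiv length rows
                    else PySem.Int.floordiv length rows + 1
  String.ofList ((PySem.List.pyRange 0 rows 1).foldl (fun out row =>
    (PySem.List.pyRange 0 cols 1).foldl (fun out col =>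
      let idx := col * rows + (if PySem.Int.mod col 2 = 0 then row else rows - 1 - row)
      if idx < length then out ++ [chars.getD idx.toNat ' '] else out) out) [])

-- ===== PRECONDITION & SPEC =====
-- A raises on rows = 0 (ZeroDivisionError) and on rows < 0 with a nonempty string (IndexError);
-- exactly those inputs are excluded (A returns normally on rows ≥ 1, and on rows < 0 with the empty string).
def Pre_encode_password (string : String) (rows : Int) : Prop :=
  1 ≤ rows ∨ (rows < 0 ∧ string = "")
instance (string : String) (rows : Int) : Decidable (Pre_encode_password string rows) := by
  unfold Pre_encode_password; infer_instance

def pvWitness_encode_password : String × Int := ("abcdef", 3)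

def Spec_encode_password (string : String) (rows : Int) (out : String) : Prop :=
  out = encode_password_alt string rows
instance (string : String) (rows : Int) (out : String) : Decidable (Spec_encode_password string rows out) := by
  unfold Spec_encode_password; infer_instance

-- ===== CLAIM (what is proved, stated in full; the proofs are below) =====
def Claim_equal_encode_password : Prop := ∀ (string : String) (rows : Int),
  Dom_encode_password string rows → Pre_encode_password string rows →
  Spec_encode_password string rows (encode_password string rows)

-- ===== LEMMAS AND PROOFS =====

-- closed-form description of A's traversal: the source index written into cell (r, c)
def zIdx (R r c : Nat) : Nat := c * R + (if c % 2 = 0 then r else R - 1 - r)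
-- position of A's write cursor before step k
def zRow (R k : Nat) : Nat := if (k / R) % 2 = 0 then k % R else R - 1 - k % R
def zCol (R k : Nat) : Nat := k / R
-- the matrix contents after the first k characters have been written
def zGrid (chars : List Char) (R C k : Nat) : List (List (List Char)) :=
  (List.range R).map fun r => (List.range C).map fun c =>
    if zIdx R r c < k then [chars.getD (zIdx R r c) ' '] else []

theorem zIdx_pos (R k : Nat) (hR : 0 < R) :
    zIdx R (zRow R k) (zCol R k) = k ∧ zRow R k < R := by
  unfold zIdx zRow zCol
  have h1 := Nat.div_add_mod' k R
  have h2 := Nat.mod_lt k hR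
  split_ifs with h <;> omega

theorem zIdx_eq_iff (R r c k : Nat) (hR : 0 < R) (hr : r < R) :
    zIdx R r c = k ↔ (r = zRow R k ∧ c = zCol R k) := by
  constructor
  · intro h
    have hb : c * R ≤ k ∧ k < (c + 1) * R := by
      have hcc : (c + 1) * R = c * R + R := by ring
      unfold zIdx at h
      split_ifs at h <;> omega
    have hc : k / R = c := Nat.div_eq_of_lt_le hb.1 hb.2
    have h1 := Nat.div_add_mod' k R
    have h2 := Nat.mod_lt k hR
    unfold zIdx at h
    unfold zRow zCol
    rw [hc] at *
    split_ifs at h ⊢ with hpar <;> omega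
  · rintro ⟨rfl, rfl⟩
    exact (zIdx_pos R k hR).1

theorem zSucc_div (R k : Nat) (hR : 0 < R) :
    (k + 1) / R = if k % R = R - 1 then k / R + 1 else k / R := by
  have h1 := Nat.div_add_mod' k R
  have h2 := Nat.mod_lt k hR
  have hq : R * (k / R) = k / R * R := Nat.mul_comm R (k / R)
  have hq2 : R * (k / R + 1) = k / R * R + R := by ring
  split_ifs with h
  · have hk : k + 1 = R * (k / R + 1) := by omega
    rw [hk, Nat.mul_div_cancel_left _ hR]
  · have hk : k + 1 = R * (k / R) + (k % R + 1) := by omega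
    have e1 : (k % R + 1) / R = 0 := Nat.div_eq_of_lt (by omega)
    rw [hk, Nat.mul_add_div hR, e1]
    omega

theorem zSucc_mod (R k : Nat) (hR : 0 < R) :
    (k + 1) % R = if k % R = R - 1 then 0 else k % R + 1 := by
  have h1 := Nat.div_add_mod' k R
  have h2 := Nat.mod_lt k hR
  have hq : R * (k / R) = k / R * R := Nat.mul_comm R (k / R)
  have hq2 : R * (k / R + 1) = k / R * R + R := by ring
  split_ifs with h
  · have hk : k + 1 = R * (k / R + 1) := by omega
    rw [hk, Nat.mul_mod_right]
  · have hk : k + 1 = R * (k / R) + (k % R + 1) := by omega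
    rw [hk, Nat.mul_add_mod, Nat.mod_eq_of_lt (by omega)]

theorem zGrid_set (chars : List Char) (R C k : Nat) (hR : 0 < R) (_hC : zCol R k < C) :
    (zGrid chars R C k).set (zRow R k)
      (((zGrid chars R C k).getD (zRow R k) []).set (zCol R k) [chars.getD k ' '])
      = zGrid chars R C (k + 1) := by
  have hrow := (zIdx_pos R k hR).2
  have hgetD : (zGrid chars R C k).getD (zRow R k) []
      = (List.range C).map (fun c => if zIdx R (zRow R k) c < k then [chars.getD (zIdx R (zRow R k) c) ' '] else []) := by
    unfold zGrid
    exact PySem.List.getD_map_range _ _ _ _ hrow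
  rw [hgetD]
  apply List.ext_getElem
  · simp [zGrid]
  · intro i hi1 hi2
    have hiR : i < R := by
      simpa [zGrid] using hi2
    rw [List.getElem_set]
    by_cases hir : zRow R k = i
    · rw [if_pos hir]
      subst hir
      simp only [zGrid, List.getElem_map, List.getElem_range]
      apply List.ext_getElem
      · simp
      · intro j hj1 hj2
        have hjC : j < C := by simpa using hj2
        rw [List.getElem_set]
        simp only [List.getElem_map, List.getElem_range]
        by_cases hjc : zCol R k = j
        · rw [if_pos hjc, ← hjc, (zIdx_pos R k hR).1, if_pos (by omega)]
        · rw [if_neg hjc]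
          have hne : zIdx R (zRow R k) j ≠ k := by
            intro h
            exact hjc ((zIdx_eq_iff R _ j k hR hrow).mp h).2.symm
          by_cases hlt : zIdx R (zRow R k) j < k
          · rw [if_pos hlt, if_pos (by omega)]
          · rw [if_neg hlt, if_neg (by omega)]
    · rw [if_neg hir]
      simp only [zGrid, List.getElem_map, List.getElem_range]
      apply List.map_congr_left
      intro c _
      have hne : zIdx R i c ≠ k := by
        intro h
        exact hir (((zIdx_eq_iff R i c k hR hiR).mp h).1.symm)
      by_cases hlt : zIdx R i c < k
      · rw [if_pos hlt, if_pos (by omega)]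
      · rw [if_neg hlt, if_neg (by omega)]

theorem zStep (chars : List Char) (R C k : Nat) (hR : 0 < R) (hC : zCol R k < C) :
    epStep chars (R : Int) (zGrid chars R C k, ((zRow R k : Nat) : Int), ((zCol R k : Nat) : Int)) ((k : Nat) : Int)
      = (zGrid chars R C (k + 1), ((zRow R (k + 1) : Nat) : Int), ((zCol R (k + 1) : Nat) : Int)) := by
  have h1 := Nat.div_add_mod' k R
  have h2 := Nat.mod_lt k hR
  have hrow := (zIdx_pos R k hR).2
  have hdiv := zSucc_div R k hR
  have hmod := zSucc_mod R k hR
  unfold epStep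
  simp only [Int.toNat_natCast]
  rw [zGrid_set chars R C k hR hC]
  rw [PySem.Int.mod_eq_emod_of_pos (by norm_num : (0:Int) < 2)]
  unfold zRow zCol at *
  split_ifs with hA hB hC' hD
  all_goals simp only [Prod.mk.injEq]
  all_goals refine ⟨trivial, ?_, ?_⟩
  all_goals simp only [hdiv, hmod]
  all_goals split_ifs at * <;> omega

theorem zFill (chars : List Char) (R C L : Nat) (hR : 0 < R) (hLC : L ≤ C * R) :
    ∀ k, k ≤ L →
    ((List.range k).map (fun i : Nat => (i : Int))).foldl (epStep chars (R : Int))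
        (zGrid chars R C 0, 0, 0)
      = (zGrid chars R C k, ((zRow R k : Nat) : Int), ((zCol R k : Nat) : Int)) := by
  intro k
  induction k with
  | zero => intro _; simp [zRow, zCol]
  | succ k ih =>
    intro hk
    rw [List.range_succ, List.map_append, List.foldl_append, ih (by omega)]
    have hC : zCol R k < C := by
      unfold zCol
      rw [Nat.div_lt_iff_lt_mul hR]
      calc k < L := by omega
        _ ≤ C * R := hLC
    simpa using zStep chars R C k hR hC

theorem zCell (chars : List Char) (R C L r c : Nat) (hr : r < R) (hc : c < C) :
    ((zGrid chars R C L).getD r []).getD c []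
      = if zIdx R r c < L then [chars.getD (zIdx R r c) ' '] else [] := by
  have h1 : (zGrid chars R C L).getD r []
      = (List.range C).map (fun c => if zIdx R r c < L then [chars.getD (zIdx R r c) ' '] else []) := by
    unfold zGrid
    exact PySem.List.getD_map_range _ _ _ _ hr
  rw [h1]
  exact PySem.List.getD_map_range _ _ _ _ hc

theorem zIdxInt (R r c : Nat) (hr : r < R) :
    ((c : Int) * (R : Int) + (if PySem.Int.mod (c : Int) 2 = 0 then (r : Int) else (R : Int) - 1 - (r : Int)))
      = ((zIdx R r c : Nat) : Int) := by
  rw [PySem.Int.mod_eq_emod_of_pos (by norm_num : (0:Int) < 2)]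
  unfold zIdx
  split_ifs with h1 h2 h3
  · push_cast
    ring
  · omega
  · omega
  · rw [Nat.cast_add, Nat.cast_mul]
    have hsub : ((R - 1 - r : Nat) : Int) = (R : Int) - 1 - (r : Int) := by omega
    rw [hsub]

-- ===== VERDICT (by name: the statement is the Claim_ definition above) =====
theorem encode_password_spec : Claim_equal_encode_password := by
  intro s rows _ hpre
  unfold Spec_encode_password
  rcases hpre with hpos | ⟨hneg, hemp⟩
  · obtain ⟨R, rfl⟩ : ∃ R : Nat, rows = (R : Int) :=
      ⟨rows.toNat, (Int.toNat_of_nonneg (by omega)).symm⟩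
    have hR : 0 < R := by exact_mod_cast hpos
    simp only [encode_password, encode_password_alt]
    set L : Nat := s.toList.length with hL
    obtain ⟨C, hCeq, hLC⟩ :
        ∃ C : Nat,
          (if PySem.Int.mod (L : Int) (R : Int) = 0 then PySem.Int.floordiv (L : Int) (R : Int)
           else PySem.Int.floordiv (L : Int) (R : Int) + 1) = (C : Int) ∧ L ≤ C * R := by
      refine ⟨if L % R = 0 then L / R else L / R + 1, ?_, ?_⟩
      · simp only [PySem.Int.mod_natCast, PySem.Int.floordiv_natCast]
        split_ifs with h1 h2 h3 <;> push_cast <;> omega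
      · have h1 := Nat.div_add_mod' L R
        have h2 := Nat.mod_lt L hR
        have h3 : (L / R + 1) * R = L / R * R + R := by ring
        split_ifs with h <;> omega
    rw [hCeq]
    rw [PySem.List.pyRange_zero_natCast R, PySem.List.pyRange_zero_natCast C,
      PySem.List.pyRange_zero_natCast L]
    simp only [List.foldl_map, List.map_map, Function.comp_def, Int.toNat_natCast]
    have hm0 : (List.range R).map (fun _ => (List.range C).map (fun _ => ([] : List Char)))
        = zGrid s.toList R C 0 := by
      simp [zGrid]
    rw [hm0]
    have hfill := zFill s.toList R C L hR hLC L (le_refl L)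
    simp only [List.foldl_map] at hfill
    rw [hfill]
    apply congrArg
    apply PySem.List.foldl_congr_mem
    intro acc r hr
    have hrR : r < R := List.mem_range.mp hr
    apply PySem.List.foldl_congr_mem
    intro acc2 c hc
    have hcC : c < C := List.mem_range.mp hc
    rw [zCell s.toList R C L r c hrR hcC, zIdxInt R r c hrR]
    by_cases hlt : zIdx R r c < L
    · rw [if_pos hlt, if_pos (by exact_mod_cast hlt), Int.toNat_natCast]
    · rw [if_neg hlt, if_neg (by omega), List.append_nil]
  · subst hemp
    have h0 : rows.toNat = 0 := by omega
    simp [encode_password, encode_password_alt, PySem.List.pyRange_one, h0]
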